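-- pv_equiv track=rewrite | github.com/jee-in/algorithm | PYTHON/BOJ/0048_히오스 프로게이머_16564/16564_히오스 프로게이머_binary search_20250106.py | find_max_level
-- ===== SOURCE A (Python) =====
-- def find_max_level(levels, K):
--   result = 0
--   left = min(levels)
--   right = left + K
--
--   while left <= right:
--     mid = (left + right) // 2
--     sum_upgrade = sum(mid - levels[i] for i in range(len(levels)) if mid > levels[i])
--
--     if sum_upgrade == K:
--       return mid
--     elif sum_upgrade < K:
--       result = mid
--       left = mid + 1
--     else:
--       right = mid - 1
--   return result
-- ===== SOURCE B (Python) =====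
-- def find_max_level(levels, K):
--     # Sort once and sweep with a running prefix sum: raising everyone below a
--     # level m costs j*m - prefix(j) where j counts the levels below m, so each
--     # gap between consecutive sorted values directly yields its best
--     # affordable level.
--     s = sorted(levels)
--     best = s[0]          # already guaranteed without spending anything
--     prefix = s[0]
--     prev = s[0]
--     for j in range(1, len(s)):
--         x = s[j]
--         cand = min(x, (K + prefix) // j)
--         if prev < cand and best < cand:
--             best = cand
--         prefix += x
--         prev = x
--     cand = (K + prefix) // len(s)
--     if prev < cand and best < cand:
--         best = cand
--     return best
-- ===== Notes on version B (the rewrite author's own statement) =====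
-- stated objective: alternative
-- what changed: A binary-searches the whole level range, rescanning all n levels to price each probe; B sorts the levels once and makes a single prefix-sum sweep that prices the best affordable level of each gap between consecutive sorted values directly, so no K-dependent search remains.
-- intended difference: On a negative budget K (with min(levels) != 0) A's search interval is empty, so it returns its initial accumulator 0, which is not an achievable level; B returns min(levels), the level already guaranteed without spending, which is the intended answer for a budget that allows no upgrades. — e.g. on find_max_level([3, 1, 4], -2): A returns 0, B returns 1
import Mathlib
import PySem

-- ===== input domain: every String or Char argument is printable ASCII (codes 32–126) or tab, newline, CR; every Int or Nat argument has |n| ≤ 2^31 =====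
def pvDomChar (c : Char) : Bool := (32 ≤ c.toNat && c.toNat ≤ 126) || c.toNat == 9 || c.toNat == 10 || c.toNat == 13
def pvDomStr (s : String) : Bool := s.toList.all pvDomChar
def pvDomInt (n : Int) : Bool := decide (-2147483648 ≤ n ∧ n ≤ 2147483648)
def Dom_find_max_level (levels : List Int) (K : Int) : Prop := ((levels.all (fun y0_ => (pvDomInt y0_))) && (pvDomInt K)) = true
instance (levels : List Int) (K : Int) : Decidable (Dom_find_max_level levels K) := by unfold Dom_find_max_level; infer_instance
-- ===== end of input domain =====

-- B replaces A's binary search over the level range by one sweep over the sorted list with a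
-- running prefix sum, taking the best affordable level of each gap between consecutive sorted
-- values directly; on a negative budget B returns min(levels) where A returns 0 (see D_).

-- ===== PORT A =====
-- while left <= right: … (tail recursion on the shrinking interval [left, right])
def find_max_level_loop (levels : List Int) (K : Int) (result left right : Int) : Int :=
  if h : left ≤ right then
    let mid := PySem.Int.floordiv (left + right) 2
    -- sum(mid - levels[i] for i in range(len(levels)) if mid > levels[i])
    let su := (PySem.List.pyRange 0 (levels.length : Int) 1).foldl
      (fun acc i => if PySem.List.pyGetD levels i 0 < mid then acc + (mid - PySem.List.pyGetD levels i 0) else acc) 0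
    if su = K then mid
    else if su < K then find_max_level_loop levels K mid (mid + 1) right
    else find_max_level_loop levels K result left (mid - 1)
  else result
termination_by (right - left + 1).toNat
decreasing_by
  · have := PySem.Int.floordiv_two_mid_bounds h
    omega
  · have := PySem.Int.floordiv_two_mid_bounds h
    omega

def find_max_level (levels : List Int) (K : Int) : Int :=
  match PySem.List.min? levels (fun x => x) with
  | none => 0   -- min([]) raises ValueError: excluded by Pre_
  | some left => find_max_level_loop levels K 0 left (left + K)

-- ===== PORT B =====
-- body of Source B's for-loop over s[1:]; state = (best, prefix, prev, j)
def find_max_level_step (K : Int) : (Int × Int × Int × Int) → Int → (Int × Int × Int × Int)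
  | (best, pre, prev, j), x =>
    let cand0 := PySem.Int.floordiv (K + pre) j
    let cand := if x ≤ cand0 then x else cand0   -- min(x, (K + prefix) // j)
    let best' := if prev < cand ∧ best < cand then cand else best
    (best', pre + x, x, j + 1)

def find_max_level_alt (levels : List Int) (K : Int) : Int :=
  let s := PySem.List.sorted levels (fun x => x) false
  match s with
  | [] => 0   -- s[0] raises IndexError on the empty list: excluded by Pre_
  | hd :: tl =>
    match tl.foldl (find_max_level_step K) (hd, hd, hd, 1) with
    | (best, pre, prev, _) =>
      let cand := PySem.Int.floordiv (K + pre) ((hd :: tl).length : Int)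
      if prev < cand ∧ best < cand then cand else best

-- ===== PRECONDITION & SPEC =====
-- A raises ValueError on the empty list (min([])); B raises there too (s[0]).
def Pre_find_max_level (levels : List Int) (K : Int) : Prop := levels ≠ []
instance (levels : List Int) (K : Int) : Decidable (Pre_find_max_level levels K) := by unfold Pre_find_max_level; infer_instance
def pvWitness_find_max_level : List Int × Int := ([3, 1, 4], 5)

-- On a negative budget K (with min(levels) ≠ 0) A's search interval is empty, so it returns its
-- initial accumulator 0, which is not an achievable level; B returns min(levels), the level already
-- guaranteed without spending, which is the intended answer for a budget that allows no upgrades.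
def D_find_max_level (levels : List Int) (K : Int) : Prop :=
  K < 0 ∧ ¬((0 : Int) ∈ levels ∧ ∀ x ∈ levels, 0 ≤ x)
instance (levels : List Int) (K : Int) : Decidable (D_find_max_level levels K) := by unfold D_find_max_level; infer_instance

def Spec_find_max_level (levels : List Int) (K : Int) (out : Int) : Prop := ¬ D_find_max_level levels K → out = find_max_level_alt levels K
instance (levels : List Int) (K : Int) (out : Int) : Decidable (Spec_find_max_level levels K out) := by unfold Spec_find_max_level; infer_instance

def pvDiffWitness_find_max_level : List Int × Int := ([3, 1, 4], -2)
def pvDiffWitnessOut_find_max_level : Int × Int := (0, 1)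

-- ===== CLAIM (what is proved, stated in full; the proofs are below) =====
def Claim_unchanged_find_max_level : Prop := ∀ (levels : List Int) (K : Int), Dom_find_max_level levels K → Pre_find_max_level levels K → Spec_find_max_level levels K (find_max_level levels K)
def Claim_changed_find_max_level : Prop := Dom_find_max_level (pvDiffWitness_find_max_level.1) (pvDiffWitness_find_max_level.2) ∧ Pre_find_max_level (pvDiffWitness_find_max_level.1) (pvDiffWitness_find_max_level.2) ∧ D_find_max_level (pvDiffWitness_find_max_level.1) (pvDiffWitness_find_max_level.2) ∧ find_max_level (pvDiffWitness_find_max_level.1) (pvDiffWitness_find_max_level.2) = pvDiffWitnessOut_find_max_level.1 ∧ find_max_level_alt (pvDiffWitness_find_max_level.1) (pvDiffWitness_find_max_level.2) = pvDiffWitnessOut_find_max_level.2 ∧ pvDiffWitnessOut_find_max_level.1 ≠ pvDiffWitnessOut_find_max_level.2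
def Claim_exact_find_max_level : Prop := ∀ (levels : List Int) (K : Int), Dom_find_max_level levels K → Pre_find_max_level levels K → D_find_max_level levels K → find_max_level levels K ≠ find_max_level_alt levels K

-- ===== LEMMAS AND PROOFS =====

-- total upgrade cost of reaching level m
def pvCost (l : List Int) (m : Int) : Int := (l.map (fun v => if v < m then m - v else 0)).sum

theorem pvCost_nonneg (l : List Int) (m : Int) : 0 ≤ pvCost l m := by
  induction l with
  | nil => simp [pvCost]
  | cons a t ih =>
    simp only [pvCost, List.map_cons, List.sum_cons] at *
    split_ifs <;> omega

theorem pvCost_mono (l : List Int) {m m' : Int} (h : m ≤ m') : pvCost l m ≤ pvCost l m' := by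
  induction l with
  | nil => simp [pvCost]
  | cons a t ih =>
    simp only [pvCost, List.map_cons, List.sum_cons] at *
    split_ifs <;> omega

theorem pvCost_succ_ge {l : List Int} {x m : Int} (hx : x ∈ l) (hxm : x ≤ m) :
    pvCost l m + 1 ≤ pvCost l (m + 1) := by
  induction l with
  | nil => simp at hx
  | cons a t ih =>
    simp only [pvCost, List.map_cons, List.sum_cons] at *
    rcases List.mem_cons.mp hx with rfl | hx
    · have ht := pvCost_mono t (show m ≤ m + 1 by omega)
      simp only [pvCost] at ht
      split_ifs <;> omega
    · have := ih hx
      split_ifs <;> omega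

theorem pvCost_eq_zero {l : List Int} {m : Int} (h : ∀ x ∈ l, m ≤ x) : pvCost l m = 0 := by
  induction l with
  | nil => simp [pvCost]
  | cons a t ih =>
    have ha := h a (by simp)
    simp only [pvCost, List.map_cons, List.sum_cons] at *
    rw [if_neg (by omega), ih (fun x hx => h x (by simp [hx]))]
    omega

theorem pvCost_ge_sub {l : List Int} {x : Int} (hx : x ∈ l) (m : Int) : m - x ≤ pvCost l m := by
  induction l with
  | nil => simp at hx
  | cons a t ih =>
    simp only [pvCost, List.map_cons, List.sum_cons] at *
    have ht := pvCost_nonneg t m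
    simp only [pvCost] at ht
    rcases List.mem_cons.mp hx with rfl | hx
    · split_ifs <;> omega
    · have := ih hx
      split_ifs <;> omega

theorem pvCost_append (p r : List Int) (m : Int) :
    pvCost (p ++ r) m = pvCost p m + pvCost r m := by
  simp [pvCost]

theorem pvCost_all_lt {l : List Int} {m : Int} (h : ∀ x ∈ l, x < m) :
    pvCost l m = l.length * m - l.sum := by
  induction l with
  | nil => simp [pvCost]
  | cons a t ih =>
    have ha := h a (by simp)
    simp only [pvCost, List.map_cons, List.sum_cons, List.length_cons] at *
    rw [if_pos ha, ih (fun x hx => h x (by simp [hx]))]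
    push_cast
    ring

theorem pvCost_perm {l l' : List Int} (h : l.Perm l') (m : Int) : pvCost l m = pvCost l' m := by
  exact List.Perm.sum_eq (List.Perm.map _ h)

theorem pvSum_le {l : List Int} {c : Int} (h : ∀ x ∈ l, x ≤ c) : l.sum ≤ (l.length : Int) * c := by
  induction l with
  | nil => simp
  | cons a t ih =>
    have ha := h a (by simp)
    have := ih (fun x hx => h x (by simp [hx]))
    simp only [List.sum_cons, List.length_cons]
    push_cast
    nlinarith

-- "M is the answer": M is the largest level whose cost is within the budget
def pvIsAns (levels : List Int) (K M : Int) : Prop :=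
  pvCost levels M ≤ K ∧ ∀ m, pvCost levels m ≤ K → m ≤ M

theorem pvIsAns_unique {levels : List Int} {K M M' : Int}
    (h : pvIsAns levels K M) (h' : pvIsAns levels K M') : M = M' :=
  le_antisymm (h'.2 M h.1) (h.2 M' h'.1)

-- the inner generator sum of A is pvCost
theorem pvSu_eq_cost (levels : List Int) (mid : Int) :
    (PySem.List.pyRange 0 (levels.length : Int) 1).foldl
      (fun acc i => if PySem.List.pyGetD levels i 0 < mid then acc + (mid - PySem.List.pyGetD levels i 0) else acc) 0
    = pvCost levels mid := by
  rw [PySem.List.foldl_pyRange_zero_pyGetD' levels 0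
        (fun acc v => if v < mid then acc + (mid - v) else acc) 0]
  induction levels using List.reverseRecOn with
  | nil => simp [pvCost]
  | append_singleton t a ih =>
    rw [List.foldl_append, pvCost_append, ih]
    simp only [List.foldl_cons, List.foldl_nil, pvCost, List.map_cons, List.map_nil,
      List.sum_cons, List.sum_nil]
    split_ifs <;> omega

-- A's binary-search loop returns the answer (budget K ≥ 0)
theorem pvLoopA_correct (levels : List Int) (K : Int) (hK : 0 ≤ K) (mn : Int)
    (hmn : PySem.List.min? levels (fun x => x) = some mn) :
    ∀ res l r, mn ≤ l → pvCost levels (l - 1) ≤ K → K < pvCost levels (r + 1) →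
      (res = l - 1 ∨ (l = mn ∧ res = 0)) →
      pvIsAns levels K (find_max_level_loop levels K res l r) := by
  have hmem : mn ∈ levels := PySem.List.min?_mem hmn
  have hmin : ∀ y ∈ levels, mn ≤ y := PySem.List.min?_isMin hmn
  intro res l r
  induction res, l, r using find_max_level_loop.induct levels K with
  | case1 res l r h mid su hsu =>
    -- su = K : return mid
    intro hl hcl hcr _
    have hmid := PySem.Int.floordiv_two_mid_bounds h
    simp only [su, mid, dite_eq_ite] at hsu
    have hceq := pvSu_eq_cost levels (PySem.Int.floordiv (l + r) 2)
    have hc : pvCost levels (PySem.Int.floordiv (l + r) 2) = K := by omega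
    rw [find_max_level_loop]
    simp only [dif_pos h, hceq, if_pos hc]
    refine ⟨le_of_eq hc, fun m hm => ?_⟩
    by_contra hgt
    have h1 : pvCost levels (PySem.Int.floordiv (l + r) 2) + 1 ≤
        pvCost levels (PySem.Int.floordiv (l + r) 2 + 1) :=
      pvCost_succ_ge hmem (by omega)
    have h2 : pvCost levels (PySem.Int.floordiv (l + r) 2 + 1) ≤ pvCost levels m :=
      pvCost_mono levels (by omega)
    omega
  | case2 res l r h mid su hne hlt ih =>
    intro hl hcl hcr _
    have hmid := PySem.Int.floordiv_two_mid_bounds h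
    simp only [su, mid, dite_eq_ite] at hne hlt
    have hceq := pvSu_eq_cost levels (PySem.Int.floordiv (l + r) 2)
    have hc1 : ¬ pvCost levels (PySem.Int.floordiv (l + r) 2) = K := by omega
    have hc2 : pvCost levels (PySem.Int.floordiv (l + r) 2) < K := by omega
    rw [find_max_level_loop]
    simp only [dif_pos h, hceq, if_neg hc1, if_pos hc2]
    refine ih (by omega) ?_ hcr (Or.inl (by ring))
    have h' : mid + 1 - 1 = mid := by omega
    rw [h']
    simp only [mid]
    exact le_of_lt hc2
  | case3 res l r h mid su hne hnlt ih =>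
    intro hl hcl hcr hres
    have hmid := PySem.Int.floordiv_two_mid_bounds h
    simp only [su, mid, dite_eq_ite] at hne hnlt
    have hceq := pvSu_eq_cost levels (PySem.Int.floordiv (l + r) 2)
    have hc1 : ¬ pvCost levels (PySem.Int.floordiv (l + r) 2) = K := by omega
    have hc2 : ¬ pvCost levels (PySem.Int.floordiv (l + r) 2) < K := by omega
    rw [find_max_level_loop]
    simp only [dif_pos h, hceq, if_neg hc1, if_neg hc2]
    refine ih hl hcl ?_ hres
    have h' : mid - 1 + 1 = mid := by omega
    rw [h']
    simp only [mid]
    omega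
  | case4 res l r h =>
    intro hl hcl hcr hres
    rw [find_max_level_loop, dif_neg h]
    rcases hres with rfl | ⟨hlmn, rfl⟩
    · refine ⟨hcl, fun m hm => ?_⟩
      by_contra hgt
      have : pvCost levels (r + 1) ≤ pvCost levels m := pvCost_mono levels (by omega)
      omega
    · exfalso
      have h0 : pvCost levels mn = 0 := pvCost_eq_zero hmin
      have : pvCost levels (r + 1) ≤ pvCost levels mn := pvCost_mono levels (by omega)
      omega

theorem pvA_correct (levels : List Int) (K : Int) (hne : levels ≠ []) (hK : 0 ≤ K) :
    pvIsAns levels K (find_max_level levels K) := by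
  obtain ⟨mn, hmn⟩ : ∃ mn, PySem.List.min? levels (fun x => x) = some mn := by
    cases h : PySem.List.min? levels (fun x => x) with
    | none => exact absurd ((PySem.List.min?_eq_none_iff levels (fun x => x)).mp h) hne
    | some mn => exact ⟨mn, rfl⟩
  have hmem : mn ∈ levels := PySem.List.min?_mem hmn
  have hmin : ∀ y ∈ levels, mn ≤ y := PySem.List.min?_isMin hmn
  rw [find_max_level, hmn]
  refine pvLoopA_correct levels K hK mn hmn 0 mn (mn + K) le_rfl ?_ ?_ (Or.inr ⟨rfl, rfl⟩)
  · exact le_trans (le_of_eq (pvCost_eq_zero (fun x hx => by have := hmin x hx; omega))) hK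
  · have := pvCost_ge_sub hmem (mn + K + 1)
    omega

theorem pvA_neg (levels : List Int) (K : Int) (hK : K < 0) :
    find_max_level levels K = 0 := by
  rw [find_max_level]
  cases h : PySem.List.min? levels (fun x => x) with
  | none => rfl
  | some mn =>
    show find_max_level_loop levels K 0 mn (mn + K) = 0
    unfold find_max_level_loop
    rw [dif_neg (by omega : ¬ mn ≤ mn + K)]

-- cost of level m from the sorted decomposition p ++ q (everything in p below m, in q at or above m)
theorem pvCost_eval (levels p q : List Int) (m : Int) (hperm : (p ++ q).Perm levels)
    (hp : ∀ y ∈ p, y < m) (hq : ∀ y ∈ q, m ≤ y) :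
    pvCost levels m = (p.length : Int) * m - p.sum := by
  rw [← pvCost_perm hperm m, pvCost_append, pvCost_all_lt hp, pvCost_eq_zero hq]
  omega

-- invariant of B's sweep: p = processed part of tl, state = (best, (hd :: p).sum, last, |hd :: p|)
theorem pvFoldB_inv (levels : List Int) (K : Int) (hd : Int) (tl : List Int)
    (hs : PySem.List.sorted levels (fun x => x) false = hd :: tl) :
    ∀ (r p : List Int) (best pre prev j : Int),
      tl = p ++ r →
      j = ((hd :: p).length : Int) → pre = (hd :: p).sum →
      (∀ x ∈ hd :: p, x ≤ prev) → prev ∈ hd :: p →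
      hd ≤ best →
      (0 ≤ K → pvCost levels best ≤ K) →
      (K < 0 → best = hd) →
      (∀ m, pvCost levels m ≤ K → m ≤ prev → m ≤ best) →
      (match r.foldl (find_max_level_step K) (best, pre, prev, j) with
       | (best', pre', prev', j') =>
          pre' = (hd :: (p ++ r)).sum ∧ j' = ((hd :: (p ++ r)).length : Int) ∧
          (∀ x ∈ hd :: (p ++ r), x ≤ prev') ∧ prev' ∈ hd :: (p ++ r) ∧
          hd ≤ best' ∧
          (0 ≤ K → pvCost levels best' ≤ K) ∧
          (K < 0 → best' = hd) ∧
          (∀ m, pvCost levels m ≤ K → m ≤ prev' → m ≤ best')) := by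
  have hperm0 : (hd :: tl).Perm levels := hs ▸ PySem.List.sorted_perm levels (fun x => x) false
  have hpw0 : (hd :: tl).Pairwise (· ≤ ·) := by
    have := PySem.List.sorted_pairwise levels (fun x => x)
    rw [hs] at this
    exact this
  intro r
  induction r with
  | nil =>
    intro p best pre prev j hp hj hpre hle hmem hhd hfeas hneg hmax
    simp only [List.foldl_nil, List.append_nil]
    exact ⟨hpre, hj, hle, hmem, hhd, hfeas, hneg, hmax⟩
  | cons x rt ih =>
    intro p best pre prev j hp hj hpre hle hmem hhd hfeas hneg hmax
    -- order facts about the split (hd :: p) ++ (x :: rt) of the sorted list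
    have hpw : ((hd :: p) ++ x :: rt).Pairwise (· ≤ ·) := by
      have : hd :: tl = (hd :: p) ++ x :: rt := by rw [hp]; rfl
      exact this ▸ hpw0
    have hsplit := (List.pairwise_append).mp hpw
    have hcross : ∀ a ∈ hd :: p, a ≤ x := fun a ha => hsplit.2.2 a ha x (by simp)
    have hxrt : ∀ b ∈ rt, x ≤ b := (List.pairwise_cons.mp hsplit.2.1).1
    have hperm : ((hd :: p) ++ x :: rt).Perm levels := by
      have : hd :: tl = (hd :: p) ++ x :: rt := by rw [hp]; rfl
      exact this ▸ hperm0
    have happ : tl = (p ++ [x]) ++ rt := by rw [hp, List.append_assoc]; rfl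
    have hj0 : 0 < j := by rw [hj, List.length_cons]; push_cast; omega
    have hprevx : prev ≤ x := hcross prev hmem
    simp only [List.foldl_cons, find_max_level_step]
    have hflo : PySem.Int.floordiv (K + pre) j * j ≤ K + pre :=
      (PySem.Int.le_floordiv_iff_mul_le (by omega)).mp le_rfl
    set cand0 := PySem.Int.floordiv (K + pre) j with hcand0
    set cand := if x ≤ cand0 then x else cand0 with hcand
    have hcx : cand ≤ x := by rw [hcand]; split_ifs <;> omega
    have hcc : cand ≤ cand0 := by rw [hcand]; split_ifs <;> omega
    have hcmin : ∀ m : Int, m ≤ x → m ≤ cand0 → m ≤ cand := by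
      intro m h1 h2; rw [hcand]; split_ifs <;> omega
    -- cost of any level in the gap (prev, x]
    have hcost_gap : ∀ m : Int, prev < m → m ≤ x → pvCost levels m = j * m - pre := by
      intro m h1 h2
      rw [pvCost_eval levels (hd :: p) (x :: rt) m hperm
            (fun y hy => by have := hle y hy; omega)
            (fun y hy => by
              rcases List.mem_cons.mp hy with rfl | hy
              · exact h2
              · have := hxrt y hy; omega)]
      rw [hj, hpre]
    have hcand_le : ∀ m : Int, prev < m → m ≤ x → pvCost levels m ≤ K → m ≤ cand := by
      intro m h1 h2 h3
      rw [hcost_gap m h1 h2] at h3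
      exact hcmin m h2 ((PySem.Int.le_floordiv_iff_mul_le (by omega)).mpr (by nlinarith))
    have hcand_feas : prev < cand → pvCost levels cand ≤ K := by
      intro h1
      rw [hcost_gap cand h1 hcx]
      have h2 : j * cand ≤ j * cand0 := mul_le_mul_of_nonneg_left hcc (by omega)
      nlinarith
    -- on a negative budget the candidate never beats prev (prefix sum ≤ j * prev)
    have hno_neg : K < 0 → ¬ prev < cand := by
      intro hk hg
      have hsum : pre ≤ j * prev := by
        have := pvSum_le hle
        rw [← hpre, ← hj] at this
        omega
      have : ¬ prev ≤ cand0 := by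
        intro h1
        have := (PySem.Int.le_floordiv_iff_mul_le (by omega : (0:Int) < j)).mp h1
        nlinarith
      omega
    split_ifs with hg
    · -- guard fired: best' = cand, and the budget must be nonnegative
      have hk : 0 ≤ K := by
        by_contra hk
        exact hno_neg (by omega) hg.1
      have hstep := ih (p ++ [x]) cand (pre + x) x (j + 1) happ (by simp [hj] <;> omega)
        (by simp [hpre] <;> ring)
        (by
          intro y hy
          have hy' : y ∈ hd :: p ∨ y = x := by
            rcases List.mem_cons.mp hy with h | h
            · exact Or.inl (by simp [h])
            · rcases List.mem_append.mp h with h | h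
              · exact Or.inl (by simp [h])
              · simp at h; exact Or.inr h
          rcases hy' with h | rfl
          · exact hcross y h
          · exact le_rfl)
        (by simp)
        (by omega)
        (fun _ => hcand_feas hg.1)
        (fun h => absurd hk (by omega))
        (by
          intro m hm1 hm2
          by_cases h1 : m ≤ prev
          · have := hmax m hm1 h1; omega
          · exact hcand_le m (by omega) hm2 hm1)
      simpa only [List.append_assoc, List.singleton_append] using hstep
    · -- guard not fired: best' = best
      have hstep := ih (p ++ [x]) best (pre + x) x (j + 1) happ (by simp [hj] <;> omega)
        (by simp [hpre] <;> ring)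
        (by
          intro y hy
          have hy' : y ∈ hd :: p ∨ y = x := by
            rcases List.mem_cons.mp hy with h | h
            · exact Or.inl (by simp [h])
            · rcases List.mem_append.mp h with h | h
              · exact Or.inl (by simp [h])
              · simp at h; exact Or.inr h
          rcases hy' with h | rfl
          · exact hcross y h
          · exact le_rfl)
        (by simp)
        hhd hfeas hneg
        (by
          intro m hm1 hm2
          by_cases h1 : m ≤ prev
          · exact hmax m hm1 h1
          · have hmc : m ≤ cand := hcand_le m (by omega) hm2 hm1
            by_contra hbm
            exact hg ⟨by omega, by omega⟩)
      simpa only [List.append_assoc, List.singleton_append] using hstep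

theorem pvB_main (levels : List Int) (K : Int) (hne : levels ≠ []) :
    (0 ≤ K → pvIsAns levels K (find_max_level_alt levels K)) ∧
    (K < 0 → ∃ hd tl, PySem.List.sorted levels (fun x => x) false = hd :: tl ∧
       find_max_level_alt levels K = hd) := by
  obtain ⟨hd, tl, hs⟩ : ∃ hd tl, PySem.List.sorted levels (fun x => x) false = hd :: tl := by
    cases h : PySem.List.sorted levels (fun x => x) false with
    | nil => exact absurd ((PySem.List.sorted_eq_nil_iff levels (fun x => x) false).mp h) hne
    | cons a t => exact ⟨a, t, rfl⟩
  have hperm0 : (hd :: tl).Perm levels := hs ▸ PySem.List.sorted_perm levels (fun x => x) false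
  have hhdmin : ∀ y ∈ levels, hd ≤ y := PySem.List.key_head_sorted_le levels (fun x => x) hs
  have hcost_hd : pvCost levels hd = 0 := pvCost_eq_zero hhdmin
  have H := pvFoldB_inv levels K hd tl hs tl [] hd hd hd 1
    rfl (by simp) (by simp) (by simp) (by simp) le_rfl
    (fun _ => by omega) (fun _ => rfl) (fun m _ h2 => h2)
  rcases hfold : tl.foldl (find_max_level_step K) (hd, hd, hd, 1)
    with ⟨best', pre', prev', j'⟩
  rw [hfold] at H
  simp only [List.nil_append] at H
  obtain ⟨hpre', hj', hle', hmem', hhd', hfeas', hneg', hmax'⟩ := H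
  have hj'pos : 0 < j' := by rw [hj', List.length_cons]; push_cast; omega
  have hflo : PySem.Int.floordiv (K + pre') j' * j' ≤ K + pre' :=
    (PySem.Int.le_floordiv_iff_mul_le (by omega)).mp le_rfl
  have hcost_hi : ∀ m : Int, prev' < m → pvCost levels m = j' * m - pre' := by
    intro m h1
    rw [pvCost_eval levels (hd :: tl) [] m (by simpa using hperm0)
          (fun y hy => by have := hle' y hy; omega) (by simp)]
    rw [hj', hpre']
  have hlen : ((hd :: tl).length : Int) = j' := hj'.symm
  have halt : find_max_level_alt levels K =
      (if prev' < PySem.Int.floordiv (K + pre') j' ∧ best' < PySem.Int.floordiv (K + pre') j'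
       then PySem.Int.floordiv (K + pre') j' else best') := by
    unfold find_max_level_alt
    rw [hs]
    simp only [hfold, hlen]
  constructor
  · intro hK
    have hfeas'' : pvCost levels best' ≤ K := hfeas' hK
    rw [halt]
    split_ifs with hg
    · refine ⟨by rw [hcost_hi _ hg.1]; nlinarith, fun m hm => ?_⟩
      by_cases h1 : m ≤ prev'
      · have := hmax' m hm h1
        omega
      · rw [hcost_hi m (by omega)] at hm
        exact (PySem.Int.le_floordiv_iff_mul_le (by omega)).mpr (by nlinarith)
    · refine ⟨hfeas'', fun m hm => ?_⟩
      by_cases h1 : m ≤ prev'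
      · exact hmax' m hm h1
      · rw [hcost_hi m (by omega)] at hm
        have hmc : m ≤ PySem.Int.floordiv (K + pre') j' :=
          (PySem.Int.le_floordiv_iff_mul_le (by omega)).mpr (by nlinarith)
        by_contra hbm
        exact hg ⟨by omega, by omega⟩
  · intro hK
    refine ⟨hd, tl, hs, ?_⟩
    have hb : best' = hd := hneg' hK
    have hsum : pre' ≤ j' * prev' := by
      have := pvSum_le hle'
      rw [← hpre', ← hj'] at this
      omega
    rw [halt, hb]
    rw [if_neg ?_]
    rintro ⟨h1, h2⟩
    have : ¬ prev' ≤ PySem.Int.floordiv (K + pre') j' := by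
      intro hle
      have := (PySem.Int.le_floordiv_iff_mul_le (by omega : (0:Int) < j')).mp hle
      nlinarith
    omega

theorem pvB_correct (levels : List Int) (K : Int) (hne : levels ≠ []) (hK : 0 ≤ K) :
    pvIsAns levels K (find_max_level_alt levels K) :=
  (pvB_main levels K hne).1 hK

-- ===== VERDICT (by name: the statements are the Claim_ definitions above) =====
theorem find_max_level_spec : Claim_unchanged_find_max_level := by
  intro levels K _ hpre
  unfold Spec_find_max_level
  intro hnd
  by_cases hK : 0 ≤ K
  · exact pvIsAns_unique (pvA_correct levels K hpre hK) (pvB_correct levels K hpre hK)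
  · -- K < 0 outside D_: min(levels) = 0, so both sides are 0
    unfold D_find_max_level at hnd
    push_neg at hnd
    have hmin0 := hnd (by omega)
    obtain ⟨hd, tl, hs, hB⟩ := (pvB_main levels K hpre).2 (by omega)
    have hhdmem : hd ∈ levels := by
      have := (PySem.List.mem_sorted levels (fun x => x) false hd).mp (by rw [hs]; simp)
      exact this
    have hhdmin : ∀ y ∈ levels, hd ≤ y := PySem.List.key_head_sorted_le levels (fun x => x) hs
    have h0 : hd = 0 := by
      have h1 := hhdmin 0 hmin0.1
      have h2 := hmin0.2 hd hhdmem
      omega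
    rw [pvA_neg levels K (by omega), hB, h0]

theorem find_max_level_changed : Claim_changed_find_max_level := by
  unfold Claim_changed_find_max_level
  refine ⟨by decide, by decide, by decide, ?_, by decide, by decide⟩
  have h := pvA_neg ([3, 1, 4] : List Int) (-2) (by norm_num)
  simpa [pvDiffWitness_find_max_level, pvDiffWitnessOut_find_max_level] using h

theorem find_max_level_tight : Claim_exact_find_max_level := by
  intro levels K _ hpre hd'
  obtain ⟨hK, hmin0⟩ := hd'
  obtain ⟨hd, tl, hs, hB⟩ := (pvB_main levels K hpre).2 hK
  have hhdmem : hd ∈ levels :=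
    (PySem.List.mem_sorted levels (fun x => x) false hd).mp (by rw [hs]; simp)
  have hhdmin : ∀ y ∈ levels, hd ≤ y := PySem.List.key_head_sorted_le levels (fun x => x) hs
  rw [pvA_neg levels K hK, hB]
  intro h0
  exact hmin0 ⟨h0 ▸ hhdmem, fun x hx => by have := hhdmin x hx; omega⟩
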